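-- pv_equiv track=rewrite | github.com/mitzke/AI_test | Macke_neu.py | fuenfgleiche
-- ===== SOURCE A (Python) =====
-- def fuenfgleiche (wurf, zahl):
--     anzahl = wurf.count(zahl)
--     if anzahl == 5:
--         #print (wurf)
--         for i in range(5):
--             wurf.remove(zahl)
--         return zahl, wurf
--     else:
--         return 0, wurf
-- ===== SOURCE B (Python) =====
-- def fuenfgleiche(wurf, zahl):
--     filtered = [x for x in wurf if x != zahl]
--     if len(wurf) - len(filtered) == 5:
--         wurf[:] = filtered
--         return zahl, wurf
--     return 0, wurf
-- ===== Notes on version B (the rewrite author's own statement) =====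
-- stated objective: simpler
-- what changed: Replaces count-then-five-remove-calls (each remove rescans the list) by a single filtering pass; the removed count is read off as the length difference and the list is assigned in place only when it equals 5.
import Mathlib
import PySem

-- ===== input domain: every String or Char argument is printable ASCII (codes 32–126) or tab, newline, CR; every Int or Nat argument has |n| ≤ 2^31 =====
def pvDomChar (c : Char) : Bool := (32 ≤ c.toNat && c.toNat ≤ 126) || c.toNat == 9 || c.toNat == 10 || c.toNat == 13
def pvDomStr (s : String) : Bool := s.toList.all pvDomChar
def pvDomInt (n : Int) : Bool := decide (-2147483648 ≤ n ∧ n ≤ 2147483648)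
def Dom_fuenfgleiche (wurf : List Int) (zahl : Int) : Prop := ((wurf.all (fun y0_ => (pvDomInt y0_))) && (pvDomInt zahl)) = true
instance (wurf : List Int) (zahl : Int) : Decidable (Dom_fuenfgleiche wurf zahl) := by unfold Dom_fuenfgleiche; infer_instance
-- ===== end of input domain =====

-- B replaces A's count-then-five-remove-calls by a single filtering pass with a length-difference test (objective: simpler).
-- A mutates wurf in place when the count is 5; B performs the same in-place assignment, so the mutation is identical; the theorem is about the returned value.

-- ===== PORT A =====
def fuenfgleiche (wurf : List Int) (zahl : Int) : Int × List Int :=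
  let anzahl := PySem.List.count wurf zahl
  if anzahl = 5 then
    -- for i in range(5): wurf.remove(zahl)  — remove? never fails here since count = 5; getD is exact on this branch
    let wurf := (PySem.List.pyRange 0 5 1).foldl
      (fun w _ => (PySem.List.remove? w zahl).getD w) wurf
    (zahl, wurf)
  else
    (0, wurf)

-- ===== PORT B =====
def fuenfgleiche_alt (wurf : List Int) (zahl : Int) : Int × List Int :=
  let filtered := wurf.filter (fun x => x != zahl)
  if (wurf.length : Int) - (filtered.length : Int) = 5 then
    (zahl, filtered)
  else
    (0, wurf)

-- ===== PRECONDITION & SPEC =====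
def Spec_fuenfgleiche (wurf : List Int) (zahl : Int) (out : Int × List Int) : Prop := out = fuenfgleiche_alt wurf zahl
instance (wurf : List Int) (zahl : Int) (out : Int × List Int) : Decidable (Spec_fuenfgleiche wurf zahl out) := by unfold Spec_fuenfgleiche; infer_instance

-- ===== CLAIM (what is proved, stated in full; the proofs are below) =====
def Claim_equal_fuenfgleiche : Prop := ∀ (wurf : List Int) (zahl : Int), Dom_fuenfgleiche wurf zahl → Spec_fuenfgleiche wurf zahl (fuenfgleiche wurf zahl)

-- ===== LEMMAS AND PROOFS =====

-- A's loop body: remove-first-occurrence-or-keep equals List.erase.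
theorem removeStep_eq_erase (w : List Int) (v : Int) :
    (PySem.List.remove? w v).getD w = w.erase v := by
  by_cases h : v ∈ w
  · rw [PySem.List.remove?_eq_some_erase w v h]; rfl
  · rw [(PySem.List.remove?_eq_none_iff w v).mpr h, List.erase_of_not_mem h]; rfl

-- erase commutes past a non-matching head.
theorem erase_iter_cons_ne (v x : Int) (hx : (x == v) = false) :
    ∀ (n : Nat) (t : List Int),
      Nat.iterate (fun l => l.erase v) n (x :: t) = x :: Nat.iterate (fun l => l.erase v) n t := by
  intro n
  induction n with
  | zero => intro t; rfl
  | succ n ih =>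
    intro t
    rw [Function.iterate_succ_apply, Function.iterate_succ_apply, List.erase_cons_tail (by simp [hx]), ih]

-- erasing v count-many times is filtering v out.
theorem iterate_erase_eq_filter (v : Int) :
    ∀ (l : List Int), Nat.iterate (fun l => l.erase v) (l.count v) l = l.filter (fun x => x != v) := by
  intro l
  induction l with
  | nil => rfl
  | cons x t ih =>
    by_cases hx : x = v
    · subst hx
      rw [List.count_cons_self, Function.iterate_succ_apply, List.erase_cons_head]
      simpa using ih
    · have hxb : (x == v) = false := by simpa using hx
      rw [List.count_cons_of_ne hx, erase_iter_cons_ne v x hxb, ih]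
      simp [bne, hxb]

-- length minus filtered length is the count.
theorem length_sub_filter_eq_count (l : List Int) (v : Int) :
    (l.length : Int) - ((l.filter (fun x => x != v)).length : Int) = (l.count v : Int) := by
  induction l with
  | nil => rfl
  | cons x t ih =>
    by_cases hx : x = v
    · subst hx
      simp only [List.filter_cons, bne_self_eq_false, List.count_cons_self, List.length_cons]
      push_cast
      omega
    · have hxb : (x != v) = true := by simpa using hx
      simp only [List.filter_cons, hxb, if_pos, List.count_cons_of_ne hx, List.length_cons]
      push_cast
      push_cast at ih
      omega

theorem foldl_range5_eq_iterate (v : Int) (l : List Int) :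
    (PySem.List.pyRange 0 5 1).foldl (fun w _ => (PySem.List.remove? w v).getD w) l
      = Nat.iterate (fun w => w.erase v) 5 l := by
  have h5 : PySem.List.pyRange 0 5 1 = [0, 1, 2, 3, 4] := by decide
  rw [h5]
  simp only [List.foldl, removeStep_eq_erase]
  rfl

-- ===== VERDICT (by name: the statement is the Claim_ definition above) =====
theorem fuenfgleiche_spec : Claim_equal_fuenfgleiche := by
  intro wurf zahl _
  unfold Spec_fuenfgleiche fuenfgleiche fuenfgleiche_alt
  have hlen := length_sub_filter_eq_count wurf zahl
  have hcnt : PySem.List.count wurf zahl = wurf.count zahl := PySem.List.count_eq wurf zahl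
  by_cases h : wurf.count zahl = 5
  · have hc : (wurf.length : Int) - ((wurf.filter (fun x => x != zahl)).length : Int) = 5 := by
      rw [hlen, h]; rfl
    simp only [hcnt, h, hc, foldl_range5_eq_iterate]
    have := iterate_erase_eq_filter zahl wurf
    rw [h] at this
    rw [this]
  · have hc : ¬ ((wurf.length : Int) - ((wurf.filter (fun x => x != zahl)).length : Int) = 5) := by
      rw [hlen]; exact_mod_cast fun he => h (by exact_mod_cast he)
    simp only [hcnt, if_neg h, if_neg hc]
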